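-- pv_equiv track=rewrite | github.com/wdchenxyz/python-algorithms | stack/is_consecutive.py | first_is_consecutive
-- ===== SOURCE A (Python) =====
-- def first_is_consecutive(stack):
--     stack_storage = [] # used to backup stack
--     for i in range(len(stack)):
--         first_element = stack.pop()
--         if len(stack) == 0:
--             stack_storage.append(first_element)
--             stack += [stack_storage.pop() for _ in range(len(stack_storage))]
--             return True
--         second_element = stack.pop()
--         if first_element - second_element != 1:
--             stack_storage.append(first_element)
--             stack_storage.append(second_element)
--             stack += [stack_storage.pop() for _ in range(len(stack_storage))]
--             return False
--         stack.append(second_element)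
--         stack_storage.append(first_element)
-- ===== SOURCE B (Python) =====
-- def first_is_consecutive(stack):
--     if not stack:
--         return None
--     return all(stack[i + 1] - stack[i] == 1 for i in range(len(stack) - 1))
-- ===== Notes on version B (the rewrite author's own statement) =====
-- stated objective: simpler
-- what changed: Replaces A's destructive pop/restore loop with a backup list by a flat read-only all() over adjacent index pairs; B never mutates the stack.
-- outside the precondition, e.g. on first_is_consecutive([]): A returns None, B returns None
import Mathlib
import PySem

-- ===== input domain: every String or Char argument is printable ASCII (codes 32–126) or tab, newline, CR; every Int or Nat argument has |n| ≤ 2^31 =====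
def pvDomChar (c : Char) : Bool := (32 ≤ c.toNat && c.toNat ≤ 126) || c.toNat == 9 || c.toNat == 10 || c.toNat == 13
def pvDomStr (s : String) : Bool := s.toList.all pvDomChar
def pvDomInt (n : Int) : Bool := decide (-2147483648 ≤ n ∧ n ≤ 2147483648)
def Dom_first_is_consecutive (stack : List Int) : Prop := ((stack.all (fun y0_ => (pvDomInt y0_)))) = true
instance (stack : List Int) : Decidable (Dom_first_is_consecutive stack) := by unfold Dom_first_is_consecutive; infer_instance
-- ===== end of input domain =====

-- B replaces A's destructive pop/restore loop (with its backup list) by a flat read-only scan of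
-- adjacent index pairs (objective: simpler).  Note: A mutates its argument while running (pop/append);
-- the equivalence proved here is about the RETURN value only — B never mutates the stack.

-- ===== PORT A =====
-- Python 'for i in range(len(stack))' with early returns: fuel = the range length,
-- state = (stack, stack_storage); 'none' = the loop fell off the end (Python returns None there,
-- excluded by Pre_).  stack.pop() = PySem.List.pop? (pop from the end).
def firstLoopA : Nat → List Int → List Int → Option Bool
  | 0, _, _ => none
  | n + 1, stack, storage =>
    match PySem.List.pop? stack with
    | none => none          -- IndexError: unreachable, the loop guard keeps stack nonempty
    | some (first_element, stack1) =>
      if stack1.length = 0 then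
        -- stack_storage.append(first_element); stack += [...]  (restore; the final stack is not returned)
        some true
      else
        match PySem.List.pop? stack1 with
        | none => none
        | some (second_element, stack2) =>
          if first_element - second_element ≠ 1 then
            -- restore from stack_storage, then:
            some false
          else
            -- stack.append(second_element); stack_storage.append(first_element)
            firstLoopA n (stack2 ++ [second_element]) (storage ++ [first_element])

def first_is_consecutive (stack : List Int) : Bool :=
  -- Python returns None when the loop body never runs (empty stack): excluded by Pre_, .getD false
  (firstLoopA stack.length stack []).getD false

-- ===== PORT B =====
def first_is_consecutive_alt (stack : List Int) : Bool :=
  if stack.isEmpty then false   -- Python B returns None here; excluded by Pre_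
  else (List.range (stack.length - 1)).all fun i =>
    (stack.getD (i + 1) 0 - stack.getD i 0) == 1

-- ===== PRECONDITION & SPEC =====
-- Pre_ excludes only the empty stack, on which A (and B) return None, not a bool.
def Pre_first_is_consecutive (stack : List Int) : Prop := stack ≠ []
instance (stack : List Int) : Decidable (Pre_first_is_consecutive stack) := by
  unfold Pre_first_is_consecutive; infer_instance

def pvWitness_first_is_consecutive : List Int := [3, 4, 5]

def Spec_first_is_consecutive (stack : List Int) (out : Bool) : Prop := out = first_is_consecutive_alt stack
instance (stack : List Int) (out : Bool) : Decidable (Spec_first_is_consecutive stack out) := by unfold Spec_first_is_consecutive; infer_instance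

-- ===== CLAIM (what is proved, stated in full; the proofs are below) =====
def Claim_equal_first_is_consecutive : Prop := ∀ (stack : List Int), Dom_first_is_consecutive stack → Pre_first_is_consecutive stack → Spec_first_is_consecutive stack (first_is_consecutive stack)

-- ===== LEMMAS AND PROOFS =====

-- B's scan, without the emptiness guard (equal to B on nonempty input).
def altScan (s : List Int) : Bool :=
  (List.range (s.length - 1)).all fun i => (s.getD (i + 1) 0 - s.getD i 0) == 1

theorem all_congr_mem {α : Type} (l : List α) (p q : α → Bool)
    (h : ∀ a ∈ l, p a = q a) : l.all p = l.all q := by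
  induction l with
  | nil => rfl
  | cons a t ih =>
    simp only [List.all_cons, h a (by simp)]
    rw [ih (fun b hb => h b (by simp [hb]))]

theorem altScan_concat2 (l : List Int) (b a : Int) :
    altScan (l ++ [b, a]) = (altScan (l ++ [b]) && ((a - b) == 1)) := by
  have h : l ++ [b, a] = (l ++ [b]) ++ [a] := by simp
  rw [h]
  have hlen : ((l ++ [b]) ++ [a]).length - 1 = l.length + 1 := by simp
  have hlen2 : (l ++ [b]).length - 1 = l.length := by simp
  unfold altScan
  rw [hlen, hlen2, List.range_succ, List.all_append]
  congr 1
  · apply all_congr_mem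
    intro i hi
    have hi' : i < l.length := by simpa using hi
    have e1 : ((l ++ [b]) ++ [a]).getD (i + 1) 0 = (l ++ [b]).getD (i + 1) 0 :=
      List.getD_append _ _ _ _ (by simp; omega)
    have e2 : ((l ++ [b]) ++ [a]).getD i 0 = (l ++ [b]).getD i 0 :=
      List.getD_append _ _ _ _ (by simp; omega)
    rw [e1, e2]
  · simp only [List.all_cons, List.all_nil, Bool.and_true]
    rw [List.getD_append_right _ _ _ _ (by simp),
        List.getD_append _ _ _ _ (by simp),
        List.getD_append_right _ _ _ _ (by simp)]
    simp

theorem firstLoopA_eq (fuel : Nat) :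
    ∀ (s st : List Int), s ≠ [] → s.length ≤ fuel →
      firstLoopA fuel s st = some (altScan s) := by
  induction fuel with
  | zero =>
    intro s st hs hlen
    exact absurd (List.length_eq_zero_iff.mp (Nat.le_zero.mp hlen)) hs
  | succ n ih =>
    intro s st hs hlen
    obtain rfl | ⟨l, a, rfl⟩ := s.eq_nil_or_concat
    · exact absurd rfl hs
    simp only [List.concat_eq_append] at *
    rw [firstLoopA, PySem.List.pop?_last]
    obtain rfl | ⟨l', b, rfl⟩ := l.eq_nil_or_concat
    · simp [altScan]
    simp only [List.concat_eq_append] at *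
    have hne : l' ++ [b] ≠ [] := by simp
    simp only [List.length_append, List.length_cons, List.length_nil] at hlen ⊢
    rw [if_neg (by simp)]
    simp only [PySem.List.pop?_last]
    have hconcat := altScan_concat2 l' b a
    rw [(show l' ++ [b] ++ [a] = l' ++ [b, a] by simp)]
    by_cases hd : a - b ≠ 1
    · rw [if_pos hd, hconcat, (by simpa using hd : ((a - b) == 1) = false)]
      simp
    · rw [if_neg hd]
      have hd : a - b = 1 := not_not.mp hd
      rw [ih (l' ++ [b]) (st ++ [a]) hne (by simp at hlen ⊢; omega), hconcat]
      simp [hd]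

-- ===== VERDICT (by name: the statement is the Claim_ definition above) =====
theorem first_is_consecutive_spec : Claim_equal_first_is_consecutive := by
  intro stack _ hpre
  unfold Spec_first_is_consecutive first_is_consecutive first_is_consecutive_alt
  rw [firstLoopA_eq stack.length stack [] hpre le_rfl,
      if_neg (by simpa [List.isEmpty_iff] using hpre)]
  rfl
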